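-- pv_equiv track=rewrite | github.com/Tavasya/class-code-backend | practice.py | remove_adjacent_indices
-- ===== SOURCE A (Python) =====
-- def remove_adjacent_indices(indices: list) -> list:
--     """
--     Remove indices that are adjacent to each other, keeping the first one in each pair.
--     Also ensures we don't blank out too many words in a row.
--     """
--     if not indices:
--         return []
--
--     # Sort indices to ensure we process them in order
--     sorted_indices = sorted(indices)
--     result = [sorted_indices[0]]
--
--     for i in range(1, len(sorted_indices)):
--         # Only add if not adjacent to the last added index
--         # and if we haven't already blanked 3 words in the last 5 positions
--         if sorted_indices[i] - result[-1] > 1: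
--             # Check the last 5 positions for density of blanks
--             recent_blanks = [idx for idx in result if sorted_indices[i] - idx <= 5]
--             if len(recent_blanks) < 3:  # Don't allow more than 3 blanks in 5 consecutive words
--                 result.append(sorted_indices[i])
--
--     return result
-- ===== SOURCE B (Python) =====
-- def remove_adjacent_indices(indices: list) -> list:
--     """Same filtering as A, but in one linear pass after sorting: since the kept
--     list is strictly increasing, the density test only needs the last three kept
--     indices, so we carry a window of (at most) the last 3 accepted values."""
--     out = []
--     win = []  # last up to 3 accepted indices
--     for x in sorted(indices):
--         if win and x - win[-1] <= 1:
--             continue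
--         if len(win) == 3 and x - win[0] <= 5:
--             continue
--         out.append(x)
--         win.append(x)
--         if len(win) > 3:
--             win.pop(0)
--     return out
-- ===== Notes on version B (the rewrite author's own statement) =====
-- stated objective: faster
-- what changed: B replaces A's per-candidate rescan of the entire kept list (the recent_blanks comprehension) with a single pass over the sorted input carrying only the last three kept indices, which suffices because the kept list is strictly increasing so the density test only depends on its 3-suffix.
import Mathlib
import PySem

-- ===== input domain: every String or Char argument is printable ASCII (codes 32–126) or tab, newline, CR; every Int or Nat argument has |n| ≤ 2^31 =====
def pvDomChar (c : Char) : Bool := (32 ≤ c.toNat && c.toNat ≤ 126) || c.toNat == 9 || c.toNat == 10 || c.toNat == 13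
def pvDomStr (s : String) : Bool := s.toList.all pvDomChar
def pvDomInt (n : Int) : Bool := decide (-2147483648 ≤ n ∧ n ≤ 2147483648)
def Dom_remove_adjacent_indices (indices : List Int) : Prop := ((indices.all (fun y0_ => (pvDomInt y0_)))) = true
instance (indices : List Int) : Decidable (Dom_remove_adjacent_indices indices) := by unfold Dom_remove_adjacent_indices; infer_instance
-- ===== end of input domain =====

-- B replaces A's per-candidate rescan of the whole kept list by a window of the
-- last three kept indices, carried through one pass over the sorted input.

-- ===== PORT A =====
-- body of A's for-loop: result[-1], the adjacency test, and the density rescan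
def stepA (result : List Int) (x : Int) : List Int :=
  match PySem.List.pyGet? result (-1) with      -- result[-1] (result is never empty)
  | none => result
  | some last =>
    if x - last > 1 then
      if (result.filter (fun idx => decide (x - idx ≤ 5))).length < 3 then
        result ++ [x]
      else result
    else result

def remove_adjacent_indices (indices : List Int) : List Int :=
  if indices = [] then []
  else
    let s := PySem.List.sorted indices (fun y => y) false
    (PySem.List.pyRange 1 (s.length : Int) 1).foldl
      (fun result i => stepA result (PySem.List.pyGetD s i 0))
      [PySem.List.pyGetD s 0 0]

-- ===== PORT B =====
-- body of B's for-loop over state (out, win); win holds the last ≤ 3 accepted indices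
def stepB (st : List Int × List Int) (x : Int) : List Int × List Int :=
  if st.2 ≠ [] ∧ x - st.2.getLastD 0 ≤ 1 then st
  else if st.2.length = 3 ∧ x - st.2.headD 0 ≤ 5 then st
  else
    let w := st.2 ++ [x]
    (st.1 ++ [x], if w.length > 3 then w.drop 1 else w)

def remove_adjacent_indices_alt (indices : List Int) : List Int :=
  ((PySem.List.sorted indices (fun y => y) false).foldl stepB ([], [])).1

-- ===== PRECONDITION & SPEC =====
def Spec_remove_adjacent_indices (indices : List Int) (out : List Int) : Prop := out = remove_adjacent_indices_alt indices
instance (indices : List Int) (out : List Int) : Decidable (Spec_remove_adjacent_indices indices out) := by unfold Spec_remove_adjacent_indices; infer_instance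

-- ===== CLAIM (what is proved, stated in full; the proofs are below) =====
def Claim_equal_remove_adjacent_indices : Prop := ∀ (indices : List Int), Dom_remove_adjacent_indices indices → Spec_remove_adjacent_indices indices (remove_adjacent_indices indices)

-- ===== LEMMAS AND PROOFS =====

-- loop invariant: A's list r and B's window w agree as r = pre ++ w, where w is
-- the (≤ 3)-suffix of r (full when anything precedes it) and r is strictly sorted
def InvRW (r w : List Int) : Prop :=
  ∃ pre, r = pre ++ w ∧ w.length ≤ 3 ∧ (pre ≠ [] → w.length = 3) ∧
    r.Pairwise (· < ·) ∧ w ≠ []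

set_option maxHeartbeats 1000000 in
lemma pv_step (x : Int) (r w : List Int) (h : InvRW r w) :
    stepA r x = (stepB (r, w) x).1 ∧ InvRW (stepA r x) (stepB (r, w) x).2 := by
  obtain ⟨pre, hr, hlen, hpre3, hpw, hwne⟩ := h
  subst hr
  rcases w with _ | ⟨a, _ | ⟨b, _ | ⟨c, _ | ⟨d, tl⟩⟩⟩⟩
  · exact absurd rfl hwne
  · -- w = [a]
    have hpre : pre = [] := by
      by_contra hne
      simpa using hpre3 hne
    subst hpre
    simp only [List.nil_append] at hpw ⊢
    have hga : PySem.List.pyGet? [a] (-1) = some a := by simp [pysem]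
    by_cases h1 : x - a ≤ 1
    · have hA : stepA [a] x = [a] := by
        simp [stepA, hga, show ¬ 1 < x - a by omega]
      have hB : stepB ([a], [a]) x = ([a], [a]) := by
        simp [stepB, h1]
      rw [hA, hB]
      exact ⟨rfl, [], rfl, by simp, by simp, hpw, by simp⟩
    · have hA : stepA [a] x = [a, x] := by
        have hfl := List.length_filter_le (fun idx => decide (x ≤ 5 + idx)) [a]
        simp [stepA, hga, show 1 < x - a by omega]
        simp at hfl
        omega
      have hB : stepB ([a], [a]) x = ([a, x], [a, x]) := by
        simp [stepB, h1]
      rw [hA, hB]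
      exact ⟨rfl, [], rfl, by simp, by simp, by simp [List.pairwise_cons]; omega, by simp⟩
  · -- w = [a, b]
    have hpre : pre = [] := by
      by_contra hne
      simpa using hpre3 hne
    subst hpre
    simp only [List.nil_append] at hpw ⊢
    have hab : a < b := by simpa using hpw
    have hgb : PySem.List.pyGet? [a, b] (-1) = some b := by simp [pysem]
    by_cases h1 : x - b ≤ 1
    · have hA : stepA [a, b] x = [a, b] := by
        simp [stepA, hgb, show ¬ 1 < x - b by omega]
      have hB : stepB ([a, b], [a, b]) x = ([a, b], [a, b]) := by
        simp [stepB, h1]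
      rw [hA, hB]
      exact ⟨rfl, [], rfl, by simp, by simp, hpw, by simp⟩
    · have hA : stepA [a, b] x = [a, b, x] := by
        have hfl := List.length_filter_le (fun idx => decide (x ≤ 5 + idx)) [a, b]
        simp [stepA, hgb, show 1 < x - b by omega]
        simp at hfl
        omega
      have hB : stepB ([a, b], [a, b]) x = ([a, b, x], [a, b, x]) := by
        simp [stepB, h1]
      rw [hA, hB]
      exact ⟨rfl, [], rfl, by simp, by simp, by simp [List.pairwise_cons]; omega, by simp⟩
  · -- w = [a, b, c]
    rw [List.pairwise_append] at hpw
    obtain ⟨hp1, hp2, hcross⟩ := hpw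
    have hab : a < b := by simp [List.pairwise_cons] at hp2; omega
    have hbc : b < c := by simp [List.pairwise_cons] at hp2; omega
    have hgc : PySem.List.pyGet? (pre ++ [a, b, c]) (-1) = some c := by simp [pysem]
    by_cases h1 : x - c ≤ 1
    · have hA : stepA (pre ++ [a, b, c]) x = pre ++ [a, b, c] := by
        simp [stepA, hgc, show ¬ 1 < x - c by omega]
      have hB : stepB (pre ++ [a, b, c], [a, b, c]) x = (pre ++ [a, b, c], [a, b, c]) := by
        simp [stepB, h1]
      rw [hA, hB]
      refine ⟨rfl, pre, rfl, by simp, fun _ => rfl, ?_, by simp⟩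
      rw [List.pairwise_append]
      exact ⟨hp1, hp2, hcross⟩
    · by_cases h2 : x - a ≤ 5
      · have hA : stepA (pre ++ [a, b, c]) x = pre ++ [a, b, c] := by
          simp [stepA, hgc, show 1 < x - c by omega]
          rw [List.filter_cons_of_pos (by simp; omega),
            List.filter_cons_of_pos (by simp; omega),
            List.filter_cons_of_pos (by simp; omega)]
          simp
        have hB : stepB (pre ++ [a, b, c], [a, b, c]) x = (pre ++ [a, b, c], [a, b, c]) := by
          simp [stepB, h1]
          omega
        rw [hA, hB]
        refine ⟨rfl, pre, rfl, by simp, fun _ => rfl, ?_, by simp⟩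
        rw [List.pairwise_append]
        exact ⟨hp1, hp2, hcross⟩
      · have hxall : ∀ y ∈ pre ++ [a, b, c], y < x := by
          intro y hy
          rcases List.mem_append.mp hy with hy | hy
          · have := hcross y hy c (by simp)
            omega
          · simp at hy
            rcases hy with rfl | rfl | rfl <;> omega
        have hA : stepA (pre ++ [a, b, c]) x = pre ++ [a, b, c] ++ [x] := by
          have hnil : pre.filter (fun idx => decide (x ≤ 5 + idx)) = [] := by
            rw [List.filter_eq_nil_iff]
            intro y hy
            have := hcross y hy a (by simp)
            simp
            omega
          simp [stepA, hgc, show 1 < x - c by omega]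
          rw [hnil, List.filter_cons_of_neg (by simp; omega)]
          have := List.length_filter_le (fun idx => decide (x ≤ 5 + idx)) [b, c]
          simp only [List.length_cons, List.length_nil] at this
          simp
          omega
        have hB : stepB (pre ++ [a, b, c], [a, b, c]) x = (pre ++ [a, b, c] ++ [x], [b, c, x]) := by
          simp [stepB, h1]
          omega
        rw [hA, hB]
        refine ⟨rfl, pre ++ [a], by simp, by simp, fun _ => rfl, ?_, by simp⟩
        rw [List.pairwise_append]
        refine ⟨by rw [List.pairwise_append]; exact ⟨hp1, hp2, hcross⟩, by simp, ?_⟩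
        intro y hy z hz
        simp at hz
        subst hz
        exact hxall y hy
  · -- w too long: contradicts the length bound
    simp at hlen
    omega

lemma pv_fold (t : List Int) : ∀ r w, InvRW r w →
    t.foldl stepA r = (t.foldl stepB (r, w)).1 ∧
    InvRW (t.foldl stepA r) (t.foldl stepB (r, w)).2 := by
  intro r w h
  induction t generalizing r w with
  | nil => exact ⟨rfl, h⟩
  | cons a t ih =>
    obtain ⟨he, hi⟩ := pv_step a r w h
    simp only [List.foldl_cons]
    have := ih (stepB (r, w) a).1 (stepB (r, w) a).2 (he ▸ hi)
    rw [he]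
    simpa using this

-- ===== VERDICT (by name: the statement is the Claim_ definition above) =====
theorem remove_adjacent_indices_spec : Claim_equal_remove_adjacent_indices := by
  intro indices _
  unfold Spec_remove_adjacent_indices remove_adjacent_indices remove_adjacent_indices_alt
  by_cases hi : indices = []
  · subst hi; rfl
  · rw [if_neg hi]
    have hs : PySem.List.sorted indices (fun y => y) false ≠ [] := by
      intro hnil
      have := PySem.List.sorted_perm indices (fun y => y) false
      rw [hnil] at this
      exact hi (List.Perm.nil_eq this).symm
    obtain ⟨h, t, hst⟩ := List.exists_cons_of_ne_nil hs
    simp only [hst]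
    rw [PySem.List.foldl_pyRange_pyGetD' (h :: t) 0 stepA _ (by norm_num)]
    have hB : stepB ([], []) h = ([h], [h]) := by simp [stepB]
    simp only [List.foldl_cons, Int.toNat_one, List.drop_one, List.tail_cons,
      PySem.List.pyGetD_zero_cons, hB]
    exact (pv_fold t [h] [h] ⟨[], rfl, by simp, by simp, by simp, by simp⟩).1
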